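-- pv_equiv track=rewrite | github.com/MFSJMenger/pysurf | pysurf/sampling/n_grid_iter.py | get_set
-- ===== SOURCE A (Python) =====
-- def get_set(dim, maximum):
--     """ Provides all possible square numbers that could be needed
--     to calculate maximum as a sum of a dim-dimensional vector.
--     For example: dim = 2, maximum = 5, then the function will return
--     [4, 1, 1, 0, 0]
--     the repetitions of the numbers are important for get_base_vector
--     """
--
--     i = 0
--     numbers = []
--     while i**2 <= maximum:
--         n = i**2
--         counter = 0
--         while n <= maximum and counter < dim:
--             numbers += [i**2]
--             n += i**2
--             counter += 1
--         i += 1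
--     return numbers
-- ===== SOURCE B (Python) =====
-- def get_set(dim, maximum):
--     """Same result as A: each square i*i (i = 0, 1, ...) with i*i <= maximum,
--     repeated min(dim, maximum // (i*i)) times (dim times for 0), in ascending order.
--     The repetition count is computed in closed form by integer division instead
--     of the inner accumulator loop."""
--     if maximum < 0:
--         return []
--     d = dim if dim > 0 else 0
--     out = [0] * d
--     i = 1
--     while i * i <= maximum:
--         out += [i * i] * min(d, maximum // (i * i))
--         i += 1
--     return out
-- ===== Notes on version B (the rewrite author's own statement) =====
-- stated objective: faster
-- what changed: B replaces A's inner accumulator while-loop (repeatedly adding i*i and appending one copy at a time) with a closed-form repetition count min(dim, maximum // (i*i)) per square appended in one extend, handling i = 0 as a [0]*dim prefix and negative maximum by an early empty return.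
import Mathlib
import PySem

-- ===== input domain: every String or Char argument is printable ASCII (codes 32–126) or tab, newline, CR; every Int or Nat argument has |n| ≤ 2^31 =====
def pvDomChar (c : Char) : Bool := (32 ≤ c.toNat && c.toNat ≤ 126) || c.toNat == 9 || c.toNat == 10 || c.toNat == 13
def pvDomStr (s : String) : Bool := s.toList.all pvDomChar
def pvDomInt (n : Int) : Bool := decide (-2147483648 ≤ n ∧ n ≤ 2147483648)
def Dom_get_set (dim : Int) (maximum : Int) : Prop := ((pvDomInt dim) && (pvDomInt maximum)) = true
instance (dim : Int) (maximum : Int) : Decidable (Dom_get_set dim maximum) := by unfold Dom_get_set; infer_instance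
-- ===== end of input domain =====

-- B computes each square's repetition count in closed form by integer division
-- instead of A's inner accumulator loop (objective: simpler).

-- ===== PORT A =====
-- inner 'while n <= maximum and counter < dim' loop of A
def pvInnerA (dim maximum sq : Int) (n counter : Int) (acc : List Int) : List Int :=
  if n ≤ maximum ∧ counter < dim then
    pvInnerA dim maximum sq (n + sq) (counter + 1) (acc ++ [sq])
  else acc
termination_by (dim - counter).toNat
decreasing_by omega

-- outer 'while i**2 <= maximum' loop of A (i starts at 0 and only increments, so a Nat)
def pvOuterA (dim maximum : Int) (i : Nat) (acc : List Int) : List Int :=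
  if _h : ((i : Int)) ^ 2 ≤ maximum then
    pvOuterA dim maximum (i + 1) (pvInnerA dim maximum ((i : Int) ^ 2) ((i : Int) ^ 2) 0 acc)
  else acc
termination_by (maximum + 1 - i).toNat
decreasing_by
  have hi : (i : Int) ≤ (i : Int) ^ 2 := by nlinarith [Int.natCast_nonneg i]
  omega

def get_set (dim : Int) (maximum : Int) : List Int :=
  pvOuterA dim maximum 0 []

-- ===== PORT B =====
-- B's 'while i * i <= maximum' loop starting at i = 1; each square contributes
-- [i*i] * min(d, maximum // (i*i)) at once (the count is ≥ 0 inside the loop)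
def pvLoopB (d maximum : Int) (i : Nat) (acc : List Int) : List Int :=
  if _h : (i : Int) * i ≤ maximum then
    pvLoopB d maximum (i + 1)
      (acc ++ List.replicate (min d (PySem.Int.floordiv maximum ((i : Int) * i))).toNat ((i : Int) * i))
  else acc
termination_by (maximum + 1 - i).toNat
decreasing_by
  have hi : (i : Int) ≤ (i : Int) * i := by nlinarith [Int.natCast_nonneg i]
  omega

def get_set_alt (dim : Int) (maximum : Int) : List Int :=
  if maximum < 0 then []
  else
    let d : Int := if dim > 0 then dim else 0
    pvLoopB d maximum 1 (List.replicate d.toNat 0)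

-- ===== PRECONDITION & SPEC =====
def Spec_get_set (dim : Int) (maximum : Int) (out : List Int) : Prop := out = get_set_alt dim maximum
instance (dim : Int) (maximum : Int) (out : List Int) : Decidable (Spec_get_set dim maximum out) := by unfold Spec_get_set; infer_instance

-- ===== CLAIM (what is proved, stated in full; the proofs are below) =====
def Claim_equal_get_set : Prop := ∀ (dim : Int) (maximum : Int), Dom_get_set dim maximum → Spec_get_set dim maximum (get_set dim maximum)

-- ===== LEMMAS AND PROOFS =====

-- A's inner loop with sq = 0 appends (dim - counter).toNat zeros (when 0 ≤ maximum)
theorem pvInnerA_zero (dim maximum : Int) (hm : 0 ≤ maximum) :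
    ∀ (counter : Int) (acc : List Int),
      pvInnerA dim maximum 0 0 counter acc = acc ++ List.replicate (dim - counter).toNat 0 := by
  intro counter
  induction hk : (dim - counter).toNat generalizing counter with
  | zero =>
    intro acc
    rw [pvInnerA]
    have : ¬ (0 ≤ maximum ∧ counter < dim) := by omega
    simp [this]
  | succ k ih =>
    intro acc
    rw [pvInnerA]
    have hc : counter < dim := by omega
    simp only [hm, hc, and_self, if_pos, add_zero]
    rw [ih (counter + 1) (by omega)]
    simp [List.replicate_succ]

-- A's inner loop with sq > 0: appends min(dim - counter, (maximum - n) // sq + 1) copies of sq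
theorem pvInnerA_pos (dim maximum sq : Int) (hsq : 0 < sq) :
    ∀ (counter n : Int) (acc : List Int),
      pvInnerA dim maximum sq n counter acc =
        acc ++ List.replicate (min (dim - counter) ((maximum - n) / sq + 1)).toNat sq := by
  intro counter
  induction hk : (dim - counter).toNat generalizing counter with
  | zero =>
    intro n acc
    rw [pvInnerA]
    have hc : ¬ counter < dim := by omega
    have : ¬ (n ≤ maximum ∧ counter < dim) := by tauto
    have hmin : (min (dim - counter) ((maximum - n) / sq + 1)).toNat = 0 := by omega
    simp [this, hmin]
  | succ k ih =>
    intro n acc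
    rw [pvInnerA]
    by_cases hn : n ≤ maximum
    · have hc : counter < dim := by omega
      simp only [hn, hc, and_self, if_pos]
      rw [ih (counter + 1) (by omega)]
      have hdiv : (maximum - (n + sq)) / sq = (maximum - n) / sq - 1 := by
        have := Int.add_mul_ediv_right (maximum - n) (-1) (show sq ≠ 0 by omega)
        have harg : maximum - (n + sq) = maximum - n + -1 * sq := by ring
        rw [harg, this]; ring
      have hq : 0 ≤ (maximum - n) / sq := Int.ediv_nonneg (by omega) (by omega)
      have hK : (min (dim - counter) ((maximum - n) / sq + 1)).toNat =
          (min (dim - (counter + 1)) ((maximum - (n + sq)) / sq + 1)).toNat + 1 := by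
        rw [hdiv]; omega
      rw [hK, show (min (dim - (counter + 1)) ((maximum - (n + sq)) / sq + 1)).toNat + 1
            = 1 + (min (dim - (counter + 1)) ((maximum - (n + sq)) / sq + 1)).toNat by omega,
          List.replicate_add]
      simp
    · have : ¬ (n ≤ maximum ∧ counter < dim) := by tauto
      have hqneg : (maximum - n) / sq < 0 := by
        by_contra hq
        push Not at hq
        have := Int.ediv_mul_le (maximum - n) (show sq ≠ 0 by omega)
        nlinarith
      have hmin : (min (dim - counter) ((maximum - n) / sq + 1)).toNat = 0 := by omega
      simp [this, hmin]

-- the count B appends equals the count A's inner loop appends for square sq ≤ maximum, sq > 0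
theorem chunk_eq (dim maximum sq : Int) (hsq : 0 < sq) :
    (min (dim - 0) ((maximum - sq) / sq + 1)).toNat
      = (min (if dim > 0 then dim else 0) (PySem.Int.floordiv maximum sq)).toNat := by
  rw [PySem.Int.floordiv_eq_ediv_of_pos hsq]
  have hdiv : (maximum - sq) / sq = maximum / sq - 1 := by
    have := Int.add_mul_ediv_right maximum (-1) (show sq ≠ 0 by omega)
    have harg : maximum - sq = maximum + -1 * sq := by ring
    rw [harg, this]; ring
  rw [hdiv]
  split_ifs with h <;> omega

-- A's outer loop from any i ≥ 1 equals B's loop from the same i on the same accumulator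
theorem loops_eq (dim maximum : Int) :
    ∀ (i : Nat) (acc : List Int), 1 ≤ i →
      pvOuterA dim maximum i acc = pvLoopB (if dim > 0 then dim else 0) maximum i acc := by
  intro i
  induction hk : (maximum + 1 - i).toNat using Nat.strong_induction_on generalizing i with
  | _ k ih =>
    intro acc hi
    rw [pvOuterA, pvLoopB]
    by_cases h : (i : Int) * i ≤ maximum
    · have hpow : ((i : Int)) ^ 2 = (i : Int) * i := by ring
      have hsq : (0 : Int) < (i : Int) * i := by
        have : (1 : Int) ≤ (i : Int) := by exact_mod_cast hi
        nlinarith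
      simp only [hpow, h, dif_pos]
      rw [pvInnerA_pos dim maximum ((i : Int) * i) hsq 0 ((i : Int) * i) acc]
      rw [chunk_eq dim maximum ((i : Int) * i) hsq]
      have hlt : (i : Int) ≤ (i : Int) * i := by nlinarith [Int.natCast_nonneg i]
      exact ih (maximum + 1 - (i + 1)).toNat (by omega) (i + 1) rfl _ (by omega)
    · have hpow : ¬ ((i : Int)) ^ 2 ≤ maximum := by
        have : ((i : Int)) ^ 2 = (i : Int) * i := by ring
        omega
      simp [h, hpow]

-- ===== VERDICT (by name: the statement is the Claim_ definition above) =====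
theorem get_set_spec : Claim_equal_get_set := by
  intro dim maximum _
  unfold Spec_get_set get_set get_set_alt
  by_cases hm : maximum < 0
  · rw [pvOuterA]
    have : ¬ ((0 : Nat) : Int) ^ 2 ≤ maximum := by push_cast; omega
    simp [hm]
  · rw [pvOuterA]
    have h0 : ((0 : Nat) : Int) ^ 2 ≤ maximum := by push_cast; omega
    simp only [h0, dif_pos, if_neg hm]
    have : ((0 : Nat) : Int) ^ 2 = 0 := by norm_num
    rw [this, pvInnerA_zero dim maximum (by omega) 0 []]
    rw [loops_eq dim maximum 1 _ (by omega)]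
    have h2 : (dim - 0).toNat = (if dim > 0 then dim else 0).toNat := by split_ifs <;> omega
    rw [List.nil_append, h2]
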